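-- pv_equiv track=rewrite | github.com/Dark-CLI/smarthub | data/builders.py | _service_names_for_domain
-- ===== SOURCE A (Python) =====
-- from typing import Any, Dict, List, Tuple
--
-- def _service_names_for_domain(domain_services_block: Dict[str, Any]) -> List[str]:
--     if not isinstance(domain_services_block, dict):
--         return []
--     names = sorted(domain_services_block.keys())
--     priority = [
--         "turn_on", "turn_off", "toggle", "set_percentage", "oscillate",
--         "set_temperature", "open", "close", "pause", "play",
--         "volume_set", "volume_up", "volume_down",
--     ]
--     prio_set = set(priority)
--     pref = [n for n in priority if n in names]
--     rest = [n for n in names if n not in prio_set]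
--     # keep concise; retrieval works better with short descriptors
--     return (pref + rest)[:12]
-- ===== SOURCE B (Python) =====
-- def _service_names_for_domain(domain_services_block):
--     if not isinstance(domain_services_block, dict):
--         return []
--     priority = [
--         "turn_on", "turn_off", "toggle", "set_percentage", "oscillate",
--         "set_temperature", "open", "close", "pause", "play",
--         "volume_set", "volume_up", "volume_down",
--     ]
--     rank = {name: i for i, name in enumerate(priority)}
--     slots = [None] * len(priority)
--     others = []
--     for n in domain_services_block:
--         i = rank.get(n)
--         if i is None:
--             others.append(n)
--         else:
--             slots[i] = n
--     result = [n for n in slots if n is not None] + sorted(others)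
--     return result[:12]
-- ===== Notes on version B (the rewrite author's own statement) =====
-- stated objective: alternative
-- what changed: Replaces A's sort-everything-then-two-filter-passes with a single bucket pass: each key is dropped into its priority slot (via a rank dict) or appended to an 'others' list, then the filled slots in priority order are concatenated with sorted(others) and truncated to 12; only the non-priority names are ever sorted.
import Mathlib
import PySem

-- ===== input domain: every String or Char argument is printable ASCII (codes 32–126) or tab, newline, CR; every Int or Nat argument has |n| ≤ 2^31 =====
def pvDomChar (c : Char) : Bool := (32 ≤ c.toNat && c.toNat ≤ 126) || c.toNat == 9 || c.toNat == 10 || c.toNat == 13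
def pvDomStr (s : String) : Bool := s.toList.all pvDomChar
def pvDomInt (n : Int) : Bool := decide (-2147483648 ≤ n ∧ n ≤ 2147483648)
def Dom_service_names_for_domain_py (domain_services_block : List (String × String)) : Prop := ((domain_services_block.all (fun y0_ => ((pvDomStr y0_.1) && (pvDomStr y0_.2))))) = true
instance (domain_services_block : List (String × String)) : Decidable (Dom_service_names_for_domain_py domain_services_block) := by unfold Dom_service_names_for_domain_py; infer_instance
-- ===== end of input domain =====

-- B replaces A's sort-everything + two filter passes + concatenate by a single bucket
-- pass: each key goes into its priority slot (rank dict) or into an 'others' list;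
-- only the non-priority names are sorted (objective: alternative algorithm).

-- ===== PORT A =====
def service_names_for_domain_py (domain_services_block : List (String × String)) : List String :=
  let names := PySem.List.sorted (PySem.Dict.ofList domain_services_block).keys (fun x => x)
  let priority : List String :=
    ["turn_on", "turn_off", "toggle", "set_percentage", "oscillate",
     "set_temperature", "open", "close", "pause", "play",
     "volume_set", "volume_up", "volume_down"]
  let prio_set := PySem.Set.ofList priority
  let pref := priority.filter (fun n => names.contains n)
  let rest := names.filter (fun n => !(PySem.Set.contains prio_set n))
  PySem.List.slice (pref ++ rest) none (some 12)

-- ===== PORT B =====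
-- B-side helpers: the priority list, the rank dict built from it, and the loop body.
def pvPrioB : List String :=
  ["turn_on", "turn_off", "toggle", "set_percentage", "oscillate",
   "set_temperature", "open", "close", "pause", "play",
   "volume_set", "volume_up", "volume_down"]

def pvRankB : PySem.Dict String Int :=
  (PySem.List.enumerate pvPrioB).foldl (fun d p => d.insert p.2 p.1) PySem.Dict.empty

-- one iteration of Source B's 'for n in domain_services_block' loop over (slots, others)
def pvStepB (st : List (Option String) × List String) (n : String) :
    List (Option String) × List String :=
  match pvRankB.get? n with
  | none => (st.1, st.2 ++ [n])
  | some i => (st.1.set i.toNat (some n), st.2)  -- i is always 0..12, so .set is Python's slots[i] = n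

def service_names_for_domain_py_alt (domain_services_block : List (String × String)) : List String :=
  let st := (PySem.Dict.ofList domain_services_block).keys.foldl pvStepB
    (List.replicate pvPrioB.length none, ([] : List String))
  let result := st.1.filterMap id ++ PySem.List.sorted st.2 (fun x => x)
  PySem.List.slice result none (some 12)

-- ===== PRECONDITION & SPEC =====
def Spec_service_names_for_domain_py (domain_services_block : List (String × String)) (out : List String) : Prop := out = service_names_for_domain_py_alt domain_services_block
instance (domain_services_block : List (String × String)) (out : List String) : Decidable (Spec_service_names_for_domain_py domain_services_block out) := by unfold Spec_service_names_for_domain_py; infer_instance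

-- ===== CLAIM (what is proved, stated in full; the proofs are below) =====
def Claim_equal_service_names_for_domain_py : Prop := ∀ (domain_services_block : List (String × String)), Dom_service_names_for_domain_py domain_services_block → Spec_service_names_for_domain_py domain_services_block (service_names_for_domain_py domain_services_block)

-- ===== LEMMAS AND PROOFS =====

theorem pvRankB_mem {n : String} (h : n ∈ pvPrioB) : pvRankB.get? n ≠ none := by
  fin_cases h <;> decide

theorem pvRankB_not_mem {n : String} (h : pvRankB.get? n = none) : n ∉ pvPrioB :=
  fun hmem => pvRankB_mem hmem h

theorem pvRankB_some {n : String} {i : Int} (h : pvRankB.get? n = some i) :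
    0 ≤ i ∧ i.toNat < 13 ∧ pvPrioB[i.toNat]! = n ∧ n ∈ pvPrioB := by
  have hm : (n, i) ∈ pvRankB.items := PySem.Dict.mem_items_of_get?_eq_some pvRankB h
  rw [show pvRankB.items = [("turn_on", (0:Int)), ("turn_off", 1), ("toggle", 2),
      ("set_percentage", 3), ("oscillate", 4), ("set_temperature", 5), ("open", 6),
      ("close", 7), ("pause", 8), ("play", 9), ("volume_set", 10), ("volume_up", 11),
      ("volume_down", 12)] from by decide] at hm
  simp only [List.mem_cons, List.not_mem_nil, or_false, Prod.mk.injEq] at hm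
  rcases hm with ⟨rfl, rfl⟩ | ⟨rfl, rfl⟩ | ⟨rfl, rfl⟩ | ⟨rfl, rfl⟩ | ⟨rfl, rfl⟩ | ⟨rfl, rfl⟩ |
    ⟨rfl, rfl⟩ | ⟨rfl, rfl⟩ | ⟨rfl, rfl⟩ | ⟨rfl, rfl⟩ | ⟨rfl, rfl⟩ | ⟨rfl, rfl⟩ | ⟨rfl, rfl⟩ <;>
    exact ⟨by decide, by decide, by decide, by decide⟩

theorem pv_foldB_snd (ks : List String) (s0 : List (Option String)) (o0 : List String) :
    (ks.foldl pvStepB (s0, o0)).2 = o0 ++ ks.filter (fun n => !pvPrioB.contains n) := by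
  induction ks generalizing s0 o0 with
  | nil => simp
  | cons n ks ih =>
    simp only [List.foldl_cons, List.filter_cons]
    cases h : pvRankB.get? n with
    | none =>
      have hn : n ∉ pvPrioB := pvRankB_not_mem h
      simp only [pvStepB, h]
      rw [ih]
      simp [hn]
    | some i =>
      have hn : n ∈ pvPrioB := (pvRankB_some h).2.2.2
      simp only [pvStepB, h]
      rw [ih]
      simp [hn]

theorem pv_foldB_fst (ks : List String) (s0 : List (Option String)) (o0 : List String)
    (hs : s0.length = 13) :
    (ks.foldl pvStepB (s0, o0)).1 =
      (List.range 13).map (fun j => if pvPrioB[j]! ∈ ks then some pvPrioB[j]! else s0[j]!) := by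
  induction ks generalizing s0 o0 with
  | nil =>
    simp only [List.foldl_nil]
    apply List.ext_getElem (by simp [hs])
    intro j h1 h2
    simp only [List.getElem_map, List.getElem_range, List.not_mem_nil, if_false]
    exact (getElem!_pos s0 j (by omega)).symm
  | cons n ks ih =>
    simp only [List.foldl_cons]
    cases h : pvRankB.get? n with
    | none =>
      have hn : n ∉ pvPrioB := pvRankB_not_mem h
      simp only [pvStepB, h]
      rw [ih s0 (o0 ++ [n]) hs]
      apply List.map_congr_left
      intro j hj
      rw [List.mem_range] at hj
      have hjl : j < pvPrioB.length := hj
      have hne : pvPrioB[j]! ≠ n := by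
        rw [getElem!_pos pvPrioB j hjl]
        intro he
        exact hn (he ▸ List.getElem_mem hjl)
      simp only [List.mem_cons, hne, false_or]
    | some i =>
      obtain ⟨hi0, hilt, hie, _⟩ := pvRankB_some h
      have hil : i.toNat < pvPrioB.length := hilt
      simp only [pvStepB, h]
      rw [ih (s0.set i.toNat (some n)) o0 (by simp [hs])]
      apply List.map_congr_left
      intro j hj
      rw [List.mem_range] at hj
      by_cases hji : j = i.toNat
      · rw [hji, hie]
        have hset : (s0.set i.toNat (some n))[i.toNat]! = some n := by
          rw [getElem!_pos (s0.set i.toNat (some n)) i.toNat (by simp; omega)]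
          exact List.getElem_set_self _
        rw [hset, if_pos (List.mem_cons_self ..)]
        split_ifs <;> rfl
      · have hne : pvPrioB[j]! ≠ n := by
          rw [getElem!_pos pvPrioB j hj, ← hie, getElem!_pos pvPrioB i.toNat hil]
          intro he
          exact hji ((List.Nodup.getElem_inj_iff (by decide)).mp he)
        have hset : (s0.set i.toNat (some n))[j]! = s0[j]! := by
          rw [getElem!_pos (s0.set i.toNat (some n)) j (by simp; omega),
              getElem!_pos s0 j (by omega)]
          exact List.getElem_set_ne (by omega) _
        rw [hset]
        simp only [List.mem_cons, hne, false_or]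

-- the filled slots, read off in order, are the priority names present in ks
theorem pv_filterMap_slots (ks l : List String) :
    ((List.range l.length).map (fun j => if l[j]! ∈ ks then some l[j]! else none)).filterMap id
      = l.filter (fun n => decide (n ∈ ks)) := by
  induction l with
  | nil => simp
  | cons a l ih =>
    rw [List.length_cons, List.range_succ_eq_map, List.map_cons, List.map_map]
    have hfun : ((fun j => if (a::l)[j]! ∈ ks then some (a::l)[j]! else none) ∘ Nat.succ)
        = (fun j => if l[j]! ∈ ks then some l[j]! else none) := by
      funext j
      simp only [Function.comp_apply, List.getElem!_cons_succ]
    rw [hfun, List.getElem!_cons_zero, List.filter_cons]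
    by_cases ha : a ∈ ks
    · rw [List.filterMap_cons_some (show id (if a ∈ ks then some a else none) = some a from by
        rw [if_pos ha]; rfl), if_pos (by simpa using ha), ih]
    · rw [List.filterMap_cons_none (show id (if a ∈ ks then some a else none) = none from by
        rw [if_neg ha]; rfl), if_neg (by simpa using ha), ih]

-- sorting commutes with filtering (identity key, distinct elements)
theorem pv_sorted_filter (ks : List String) (hnd : ks.Nodup) (q : String → Bool) :
    PySem.List.sorted (ks.filter q) (fun x => x) =
      (PySem.List.sorted ks (fun x => x)).filter q := by
  apply PySem.List.sorted_eq_of_perm_of_pairwise_lt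
  · exact (PySem.List.sorted_perm ks (fun x => x) false).filter q
  · have hle : (PySem.List.sorted ks (fun x => x)).Pairwise (fun a b => a ≤ b) := by
      simpa using PySem.List.sorted_pairwise ks (fun x => x)
    have hne : (PySem.List.sorted ks (fun x => x)).Pairwise (fun a b => a ≠ b) :=
      ((PySem.List.sorted_perm ks (fun x => x) false).nodup_iff.mpr hnd)
    exact ((hle.and hne).imp (fun h => lt_of_le_of_ne h.1 h.2)).filter q

-- ===== VERDICT (by name: the statement is the Claim_ definition above) =====
theorem service_names_for_domain_py_spec : Claim_equal_service_names_for_domain_py := by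
  intro dsb _
  show service_names_for_domain_py dsb = service_names_for_domain_py_alt dsb
  set ks := (PySem.Dict.ofList dsb).keys with hks
  have hnd : ks.Nodup := PySem.Dict.nodup_keys_ofList dsb
  simp only [service_names_for_domain_py, service_names_for_domain_py_alt]
  rw [pv_foldB_fst ks _ _ (by decide), pv_foldB_snd ks _ _]
  congr 1
  rw [List.nil_append, pv_sorted_filter ks hnd]
  congr 1
  -- pref = filterMap of the slots (the rest components already agree definitionally)
  have h1 : ((List.range 13).map (fun j =>
      if pvPrioB[j]! ∈ ks then some pvPrioB[j]! else (List.replicate pvPrioB.length (none : Option String))[j]!)).filterMap id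
      = pvPrioB.filter (fun n => decide (n ∈ ks)) := by
    have hrepl : ∀ j ∈ List.range 13,
        (if pvPrioB[j]! ∈ ks then some pvPrioB[j]! else (List.replicate pvPrioB.length (none : Option String))[j]!)
        = (if pvPrioB[j]! ∈ ks then some pvPrioB[j]! else none) := by
      intro j hj
      rw [List.mem_range] at hj
      rw [getElem!_pos (List.replicate pvPrioB.length (none : Option String)) j
        (by simp only [List.length_replicate]; exact hj)]
      simp
    rw [List.map_congr_left hrepl]
    exact pv_filterMap_slots ks pvPrioB
  rw [h1]
  apply List.filter_congr
  intro n _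
  simp [PySem.List.mem_sorted, ← hks]
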